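-- pv_equiv track=rewrite | github.com/BrunoGrisci/science-diplomacy-global-research | aninat.py | first_non_none_elements
-- ===== SOURCE A (Python) =====
-- def first_non_none_elements(list_of_lists):
--     if not list_of_lists:
--         return []
--
--     # Determine the length of the sublists
--     length_of_sublists = len(list_of_lists[0])
--     result = []
--
--     for i in range(length_of_sublists):
--         for sublist in list_of_lists:
--             if sublist[i].lower().rstrip() != "none":
--                 result.append(sublist[i])
--                 break
--         else:
--             result.append("None")  # If all elements at this index are None, append None
--
--     return result
-- ===== SOURCE B (Python) =====
-- def first_non_none_elements(list_of_lists):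
--     if not list_of_lists:
--         return []
--     n = len(list_of_lists[0])
--     result = ["None"] * n
--     open_cols = list(range(n))
--     for sublist in list_of_lists:
--         still_open = []
--         for i in open_cols:
--             v = sublist[i]
--             if v.lower().rstrip() != "none":
--                 result[i] = v
--             else:
--                 still_open.append(i)
--         open_cols = still_open
--         if not open_cols:
--             break
--     return result
-- ===== Notes on version B (the rewrite author's own statement) =====
-- stated objective: alternative
-- what changed: Replaces the per-column scan-with-break (column-major, building the result by appending) with a single row-major pass that preallocates result = ['None']*n and maintains the set of still-open column indices, filling cells and shrinking the open set as rows are visited, with an early exit once every column is filled.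
import Mathlib
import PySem

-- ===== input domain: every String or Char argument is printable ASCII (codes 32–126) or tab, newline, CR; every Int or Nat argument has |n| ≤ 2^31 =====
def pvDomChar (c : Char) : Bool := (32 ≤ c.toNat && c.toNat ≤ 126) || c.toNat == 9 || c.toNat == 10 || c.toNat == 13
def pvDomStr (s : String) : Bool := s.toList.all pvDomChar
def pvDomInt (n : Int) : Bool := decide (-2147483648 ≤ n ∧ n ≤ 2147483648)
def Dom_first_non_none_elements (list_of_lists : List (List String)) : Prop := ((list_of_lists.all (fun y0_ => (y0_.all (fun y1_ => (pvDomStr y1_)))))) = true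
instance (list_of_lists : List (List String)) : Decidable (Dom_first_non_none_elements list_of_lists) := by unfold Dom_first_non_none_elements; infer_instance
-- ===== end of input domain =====

-- B replaces A's per-column scan-with-break by one row-major pass that preallocates the
-- result and maintains the still-open column indices (objective: alternative decomposition).

-- shared helper: Python's  s.lower().rstrip()
def pvNorm (s : String) : String := PySem.Str.rstrip (PySem.Str.lower s)

-- ===== PORT A =====
-- inner 'for sublist in list_of_lists: … break' with the for-else appending "None".
-- sublist[i]: Python raises IndexError when i is out of range; exactly those inputs are
-- excluded by Pre_, so the '""' default of getD is never read on admitted inputs.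
def pvScanColA (rows : List (List String)) (i : Nat) : String :=
  match rows with
  | [] => "None"
  | r :: rs =>
    let v := r.getD i ""
    if pvNorm v ≠ "none" then v else pvScanColA rs i

def first_non_none_elements (list_of_lists : List (List String)) : List String :=
  if list_of_lists.isEmpty then []
  else
    (List.range list_of_lists.headI.length).foldl
      (fun result i => result ++ [pvScanColA list_of_lists i]) []

-- ===== PORT B =====
-- inner 'for i in open_cols' of Source B: state = (result, still_open)
def pvRowFold (sublist : List String) (openCols : List Nat) (result : List String) :
    List String × List Nat :=
  openCols.foldl
    (fun acc i =>
      let v := sublist.getD i ""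
      if pvNorm v ≠ "none" then (acc.1.set i v, acc.2) else (acc.1, acc.2 ++ [i]))
    (result, [])

-- outer 'for sublist in list_of_lists' with the 'if not open_cols: break'
def pvRowsLoop (rows : List (List String)) (result : List String) (openCols : List Nat) :
    List String :=
  match rows with
  | [] => result
  | r :: rs =>
    let st := pvRowFold r openCols result
    if st.2.isEmpty then st.1 else pvRowsLoop rs st.1 st.2

def first_non_none_elements_alt (list_of_lists : List (List String)) : List String :=
  match list_of_lists with
  | [] => []
  | first :: _ =>
    pvRowsLoop list_of_lists (List.replicate first.length "None") (List.range first.length)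

-- ===== PRECONDITION & SPEC =====
-- Pre_ is exactly the inputs on which Python A returns: an access sublist[i] with
-- len(sublist) ≤ i (IndexError) is only reached when no earlier row already broke the
-- column-i scan with a non-'none' in-range element; such inputs are excluded.
def Pre_first_non_none_elements (list_of_lists : List (List String)) : Prop :=
  ∀ i ∈ List.range list_of_lists.headI.length,
    ∀ j ∈ List.range list_of_lists.length,
      (list_of_lists.getD j []).length ≤ i →
        ∃ k ∈ List.range j,
          i < (list_of_lists.getD k []).length ∧
            pvNorm ((list_of_lists.getD k []).getD i "") ≠ "none"
instance (list_of_lists : List (List String)) : Decidable (Pre_first_non_none_elements list_of_lists) := by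
  unfold Pre_first_non_none_elements; infer_instance

def pvWitness_first_non_none_elements : List (List String) := [["none", "a"], ["b", "c"]]

def Spec_first_non_none_elements (list_of_lists : List (List String)) (out : List String) : Prop := out = first_non_none_elements_alt list_of_lists
instance (list_of_lists : List (List String)) (out : List String) : Decidable (Spec_first_non_none_elements list_of_lists out) := by unfold Spec_first_non_none_elements; infer_instance

-- ===== CLAIM (what is proved, stated in full; the proofs are below) =====
def Claim_equal_first_non_none_elements : Prop := ∀ (list_of_lists : List (List String)), Dom_first_non_none_elements list_of_lists → Pre_first_non_none_elements list_of_lists → Spec_first_non_none_elements list_of_lists (first_non_none_elements list_of_lists)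

-- ===== LEMMAS AND PROOFS =====

-- named copy of B's inner-loop step (proof helper)
def pvStep (r : List String) (acc : List String × List Nat) (i : Nat) : List String × List Nat :=
  let v := r.getD i ""
  if pvNorm v ≠ "none" then (acc.1.set i v, acc.2) else (acc.1, acc.2 ++ [i])

theorem pvRowFold_eq (r : List String) (openCols : List Nat) (res : List String) :
    pvRowFold r openCols res = openCols.foldl (pvStep r) (res, []) := rfl

theorem pvStep_none (r : List String) (acc : List String × List Nat) (i : Nat)
    (h : pvNorm (r[i]?.getD "") = "none") : pvStep r acc i = (acc.1, acc.2 ++ [i]) := by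
  simp [pvStep, List.getD_eq_getElem?_getD, h]

theorem pvStep_set (r : List String) (acc : List String × List Nat) (i : Nat)
    (h : ¬ pvNorm (r[i]?.getD "") = "none") :
    pvStep r acc i = (acc.1.set i (r[i]?.getD ""), acc.2) := by
  simp [pvStep, List.getD_eq_getElem?_getD, h]

theorem pvScan_cons_none (r : List String) (rs : List (List String)) (j : Nat)
    (h : pvNorm (r[j]?.getD "") = "none") : pvScanColA (r :: rs) j = pvScanColA rs j := by
  simp [pvScanColA, List.getD_eq_getElem?_getD, h]

theorem pvScan_cons_set (r : List String) (rs : List (List String)) (j : Nat)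
    (h : ¬ pvNorm (r[j]?.getD "") = "none") : pvScanColA (r :: rs) j = r[j]?.getD "" := by
  simp [pvScanColA, List.getD_eq_getElem?_getD, h]

-- A's outer loop appends one element per index: it is the map of the column scan.
theorem pv_foldl_append_map {α β : Type} (f : α → β) :
    ∀ (l : List α) (acc : List β),
      l.foldl (fun r i => r ++ [f i]) acc = acc ++ l.map f := by
  intro l
  induction l with
  | nil => simp
  | cons x xs ih => intro acc; simp [List.foldl, ih]

theorem pvFold_go_snd (r : List String) :
    ∀ (openCols : List Nat) (res : List String) (still : List Nat),
      (openCols.foldl (pvStep r) (res, still)).2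
        = still ++ openCols.filter (fun i => pvNorm (r[i]?.getD "") == "none") := by
  intro openCols
  induction openCols with
  | nil => simp
  | cons i rest ih =>
    intro res still
    by_cases h : pvNorm (r[i]?.getD "") = "none"
    · rw [List.foldl_cons, pvStep_none r _ i h, ih]
      simp [h]
    · rw [List.foldl_cons, pvStep_set r _ i h, ih]
      simp [h]

theorem pvFold_go_len (r : List String) :
    ∀ (openCols : List Nat) (res : List String) (still : List Nat),
      (openCols.foldl (pvStep r) (res, still)).1.length = res.length := by
  intro openCols
  induction openCols with
  | nil => simp
  | cons i rest ih =>
    intro res still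
    by_cases h : pvNorm (r[i]?.getD "") = "none"
    · rw [List.foldl_cons, pvStep_none r _ i h, ih]
    · rw [List.foldl_cons, pvStep_set r _ i h, ih]
      simp

theorem pvFold_go_get (r : List String) :
    ∀ (openCols : List Nat) (res : List String) (still : List Nat)
      (j : Nat), j < res.length →
      (openCols.foldl (pvStep r) (res, still)).1[j]?.getD ""
        = if j ∈ openCols ∧ ¬ pvNorm (r[j]?.getD "") = "none"
          then r[j]?.getD "" else res[j]?.getD "" := by
  intro openCols
  induction openCols with
  | nil => intro res still j hj; simp
  | cons i rest ih =>
    intro res still j hj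
    by_cases h : pvNorm (r[i]?.getD "") = "none"
    · rw [List.foldl_cons, pvStep_none r _ i h, ih res _ j hj]
      by_cases hji : j = i
      · subst hji; simp [h]
      · simp [List.mem_cons, hji]
    · rw [List.foldl_cons, pvStep_set r _ i h, ih _ _ j (by simpa using hj)]
      by_cases hji : j = i
      · subst hji
        by_cases hmem : j ∈ rest ∧ ¬ pvNorm (r[j]?.getD "") = "none"
        · simp [hmem]
        · simp [h, List.getElem?_set_self (by omega : j < res.length)]
      · have hset : (res.set i (r[i]?.getD ""))[j]? = res[j]? :=
          List.getElem?_set_ne (fun h' => hji h'.symm)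
        by_cases hmem : j ∈ rest ∧ ¬ pvNorm (r[j]?.getD "") = "none"
        · simp [hmem, List.mem_cons]
        · have hnc : ¬ (j ∈ i :: rest ∧ ¬ pvNorm (r[j]?.getD "") = "none") := by
            intro ⟨hm, hp⟩
            rcases List.mem_cons.mp hm with h1 | h1
            · exact hji h1
            · exact hmem ⟨h1, hp⟩
          simp only [hnc, if_false, hmem, if_false, hset]

theorem pvRowsLoop_len :
    ∀ (rows : List (List String)) (res : List String) (openCols : List Nat),
      (pvRowsLoop rows res openCols).length = res.length := by
  intro rows
  induction rows with
  | nil => intro res openCols; simp [pvRowsLoop]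
  | cons r rs ih =>
    intro res openCols
    simp only [pvRowsLoop]
    split
    · rw [pvRowFold_eq, pvFold_go_len]
    · rw [ih, pvRowFold_eq, pvFold_go_len]

theorem pvRowsLoop_get :
    ∀ (rows : List (List String)) (res : List String) (openCols : List Nat),
      (∀ i ∈ openCols, i < res.length → res[i]?.getD "" = "None") →
      ∀ j, j < res.length →
        (pvRowsLoop rows res openCols)[j]?.getD ""
          = if j ∈ openCols then pvScanColA rows j else res[j]?.getD "" := by
  intro rows
  induction rows with
  | nil =>
    intro res openCols hinv j hj
    by_cases hm : j ∈ openCols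
    · simp [pvRowsLoop, pvScanColA, hm, hinv j hm hj]
    · simp [pvRowsLoop, hm]
  | cons r rs ih =>
    intro res openCols hinv j hj
    simp only [pvRowsLoop]
    split
    · -- open' is empty: result is this row's result list
      rename_i hempty
      rw [pvRowFold_eq, pvFold_go_get r openCols res [] j hj]
      by_cases hm : j ∈ openCols
      · by_cases hp : pvNorm (r[j]?.getD "") = "none"
        · exfalso
          rw [pvRowFold_eq, pvFold_go_snd] at hempty
          have hjf : j ∈ openCols.filter (fun i => pvNorm (r[i]?.getD "") == "none") := by
            simp only [List.mem_filter, beq_iff_eq]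
            exact ⟨hm, hp⟩
          rw [List.isEmpty_iff] at hempty
          simp only [List.nil_append] at hempty
          simp [hempty] at hjf
        · simp [hm, hp, pvScan_cons_set r rs j hp]
      · simp [hm]
    · -- recurse on remaining rows
      rename_i hne
      have hlen : (pvRowFold r openCols res).1.length = res.length := by
        rw [pvRowFold_eq, pvFold_go_len]
      rw [ih (pvRowFold r openCols res).1 (pvRowFold r openCols res).2 ?hinv' j (by omega)]
      · rw [pvRowFold_eq, pvFold_go_snd, List.nil_append,
          pvFold_go_get r openCols res [] j hj]
        by_cases hm : j ∈ openCols
        · by_cases hp : pvNorm (r[j]?.getD "") = "none"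
          · have hjf : j ∈ openCols.filter (fun i => pvNorm (r[i]?.getD "") == "none") := by
              simp only [List.mem_filter, beq_iff_eq]
              exact ⟨hm, hp⟩
            simp [hm, hp, hjf, pvScan_cons_none r rs j hp]
          · have hjf : j ∉ openCols.filter (fun i => pvNorm (r[i]?.getD "") == "none") := by
              simp only [List.mem_filter, beq_iff_eq]
              intro ⟨_, hc⟩; exact hp hc
            simp [hm, hp, hjf, pvScan_cons_set r rs j hp]
        · have hjf : j ∉ openCols.filter (fun i => pvNorm (r[i]?.getD "") == "none") := by
            simp only [List.mem_filter]
            intro ⟨hc, _⟩; exact hm hc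
          simp [hm, hjf]
      · case hinv' =>
        intro i hi hilen
        rw [pvRowFold_eq, pvFold_go_snd, List.nil_append] at hi
        simp only [List.mem_filter, beq_iff_eq] at hi
        rw [pvRowFold_eq, pvFold_go_get r openCols res [] i (by omega)]
        simp only [hi.2, not_true_eq_false, and_false, if_false]
        exact hinv i hi.1 (by omega)

-- ===== VERDICT (by name: the statement is the Claim_ definition above) =====
theorem first_non_none_elements_spec : Claim_equal_first_non_none_elements := by
  intro lol _hdom _hpre
  unfold Spec_first_non_none_elements
  cases lol with
  | nil => rfl
  | cons first rest =>
    simp only [first_non_none_elements, first_non_none_elements_alt, List.isEmpty_cons,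
      List.headI]
    rw [if_neg (by simp), pv_foldl_append_map, List.nil_append]
    have hlenB : (pvRowsLoop (first :: rest) (List.replicate first.length "None")
        (List.range first.length)).length = first.length := by
      rw [pvRowsLoop_len]; exact List.length_replicate
    apply List.ext_getElem
    · simp [hlenB]
    · intro j hj1 hj2
      have hjn : j < first.length := by simpa using hj1
      have hB := pvRowsLoop_get (first :: rest) (List.replicate first.length "None")
        (List.range first.length)
        (by
          intro i _ hilen
          simp only [List.length_replicate] at hilen
          simp [List.getElem?_eq_getElem (by simpa using hilen : i < (List.replicate first.length "None").length)])
        j (by simpa using hjn)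
      simp only [List.mem_range, hjn, if_true] at hB
      have hgB : (pvRowsLoop (first :: rest) (List.replicate first.length "None")
          (List.range first.length))[j]?.getD "" =
          (pvRowsLoop (first :: rest) (List.replicate first.length "None")
          (List.range first.length))[j] := by
        rw [List.getElem?_eq_getElem (by omega)]
        rfl
      rw [← hgB, hB]
      simp
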